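-- pv_equiv track=rewrite | github.com/naturalstupid/PyJHora | src/jhora/horoscope/dhasa/graha/yogini.py | _antardhasa
-- ===== SOURCE A (Python) =====
-- dhasa_adhipathi_list = {1:1,0:2,4:3,2:4,3:5,6:6,5:7,7:8} # Total 36 years
--
-- def _next_adhipati(lord,dir=1):
--     """Returns next lord after `lord` in the adhipati_list"""
--     current = list(dhasa_adhipathi_list.keys()).index(lord)
--     next_lord = list(dhasa_adhipathi_list.keys())[((current + dir) % len(dhasa_adhipathi_list))]
--     return next_lord
--
-- def _antardhasa(lord,antardhasa_option=1):
--     if antardhasa_option in [3,4]: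
--         lord = _next_adhipati(lord, dir=1)
--     elif antardhasa_option in [5,6]:
--         lord = _next_adhipati(lord, dir=-1)
--     dir = 1 if antardhasa_option in [1,3,5] else -1
--     _bhukthis = []
--     for _ in range(len(dhasa_adhipathi_list)):
--         _bhukthis.append(lord)
--         lord = _next_adhipati(lord,dir)
--     return _bhukthis
-- ===== SOURCE B (Python) =====
-- dhasa_adhipathi_list = {1:1,0:2,4:3,2:4,3:5,6:6,5:7,7:8} # Total 36 years
--
-- def _antardhasa(lord, antardhasa_option=1):
--     keys = list(dhasa_adhipathi_list)
--     start = keys.index(lord)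
--     if antardhasa_option in (3, 4):
--         start = (start + 1) % 8
--     elif antardhasa_option in (5, 6):
--         start = (start - 1) % 8
--     if antardhasa_option in (1, 3, 5):
--         return keys[start:] + keys[:start]
--     rev = keys[::-1]
--     start = 7 - start
--     return rev[start:] + rev[:start]
-- ===== Notes on version B (the rewrite author's own statement) =====
-- stated objective: simpler
-- what changed: B computes one start index (keys.index(lord), shifted ±1 mod 8 for options 3/4 and 5/6) and returns the 8-lord cycle as a slice rotation of the key list (of its reversal for backward options), replacing A's loop that re-scans the key list via _next_adhipati for every element.
import Mathlib
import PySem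

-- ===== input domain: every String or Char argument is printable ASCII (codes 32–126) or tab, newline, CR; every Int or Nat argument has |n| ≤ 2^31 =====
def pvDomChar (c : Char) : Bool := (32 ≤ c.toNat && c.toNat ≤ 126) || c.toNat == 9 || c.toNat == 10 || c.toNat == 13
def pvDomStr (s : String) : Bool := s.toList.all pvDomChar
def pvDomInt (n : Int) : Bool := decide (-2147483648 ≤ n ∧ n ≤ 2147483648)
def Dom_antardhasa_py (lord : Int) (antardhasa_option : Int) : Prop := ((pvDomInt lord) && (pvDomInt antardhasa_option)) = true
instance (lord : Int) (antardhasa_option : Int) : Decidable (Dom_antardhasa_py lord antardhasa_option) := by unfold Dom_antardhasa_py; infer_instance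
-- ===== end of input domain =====

-- B replaces A's per-element _next_adhipati stepping loop with index arithmetic and slice-rotation (objective: simpler).


-- keys of dhasa_adhipathi_list in insertion order (module constant shared by both programs)
def pvKeys : List Int := [1, 0, 4, 2, 3, 6, 5, 7]

-- ===== PORT A =====
-- _next_adhipati; `.getD 0` totalises: Pre_ guarantees lord ∈ pvKeys so index? is some,
-- and the pyGet? index is (current+dir) % 8 ∈ [0,7], always in range.
def next_adhipati (lord : Int) (dir : Int) : Int :=
  let current : Int := ((PySem.List.index? pvKeys lord).getD 0 : Nat)
  (PySem.List.pyGet? pvKeys (PySem.Int.mod (current + dir) 8)).getD 0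

def antardhasa_py (lord : Int) (antardhasa_option : Int) : List Int :=
  let lord :=
    if antardhasa_option ∈ ([3, 4] : List Int) then next_adhipati lord 1
    else if antardhasa_option ∈ ([5, 6] : List Int) then next_adhipati lord (-1)
    else lord
  let dir : Int := if antardhasa_option ∈ ([1, 3, 5] : List Int) then 1 else -1
  let st := (PySem.List.pyRange 0 8 1).foldl
      (fun (s : List Int × Int) _ => (s.1 ++ [s.2], next_adhipati s.2 dir)) ([], lord)
  st.1

-- ===== PORT B =====
def antardhasa_py_alt (lord : Int) (antardhasa_option : Int) : List Int :=
  let start0 : Int := ((PySem.List.index? pvKeys lord).getD 0 : Nat)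
  let start : Int :=
    if antardhasa_option ∈ ([3, 4] : List Int) then PySem.Int.mod (start0 + 1) 8
    else if antardhasa_option ∈ ([5, 6] : List Int) then PySem.Int.mod (start0 - 1) 8
    else start0
  if antardhasa_option ∈ ([1, 3, 5] : List Int) then
    PySem.List.slice pvKeys (some start) none ++ PySem.List.slice pvKeys none (some start)
  else
    let rev := (PySem.List.slice? pvKeys none none (-1)).getD []
    let start := 7 - start
    PySem.List.slice rev (some start) none ++ PySem.List.slice rev none (some start)

-- ===== PRECONDITION & SPEC =====
-- Pre_ excludes exactly the inputs where A (and B) raise ValueError: lord not a key of dhasa_adhipathi_list.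
def Pre_antardhasa_py (lord : Int) (antardhasa_option : Int) : Prop := lord ∈ pvKeys
instance (lord : Int) (antardhasa_option : Int) : Decidable (Pre_antardhasa_py lord antardhasa_option) := by unfold Pre_antardhasa_py; infer_instance
def pvWitness_antardhasa_py : Int × Int := (4, 6)

def Spec_antardhasa_py (lord : Int) (antardhasa_option : Int) (out : List Int) : Prop := out = antardhasa_py_alt lord antardhasa_option
instance (lord : Int) (antardhasa_option : Int) (out : List Int) : Decidable (Spec_antardhasa_py lord antardhasa_option out) := by unfold Spec_antardhasa_py; infer_instance

-- ===== CLAIM (what is proved, stated in full; the proofs are below) =====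
def Claim_equal_antardhasa_py : Prop := ∀ (lord : Int) (antardhasa_option : Int), Dom_antardhasa_py lord antardhasa_option → Pre_antardhasa_py lord antardhasa_option → Spec_antardhasa_py lord antardhasa_option (antardhasa_py lord antardhasa_option)

-- ===== LEMMAS AND PROOFS =====

-- ===== VERDICT (by name: the statement is the Claim_ definition above) =====
theorem antardhasa_py_spec : Claim_equal_antardhasa_py := by
  intro lord o _ hpre
  unfold Spec_antardhasa_py
  unfold Pre_antardhasa_py at hpre
  fin_cases hpre <;>
    by_cases h1 : o ∈ ([3, 4] : List Int) <;>
    by_cases h2 : o ∈ ([5, 6] : List Int) <;>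
    by_cases h3 : o ∈ ([1, 3, 5] : List Int) <;>
    (simp only [antardhasa_py, antardhasa_py_alt, h1, h2, h3, if_true, if_false]; decide)
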